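-- pv_equiv track=rewrite | github.com/iroha-git/discord_bot | discord_bot.py | special_score_compare
-- ===== SOURCE A (Python) =====
-- def special_score_compare(score_list):  # 특수 승리 판별기
--     is_94 = False
--     is_super94 = False
--     is_37 = False
--     is_47 = False
--     is_21 = False  # 땡잡이
--     is_30 = False  # 장땡
--     is_31 = False  # 암행어사
--     result = 0
--     index_94, index_super94, index_37, index_47 = 0, 0, 0, 0
--
--     for score in score_list:
--         if score == -1:
--             is_94 = True
--         elif score == -2:
--             is_super94 = True
--         elif score == -3:
--             is_37 = True
--             index_37 = score_list.index(score)
--         elif score == -4: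
--             is_47 = True
--             index_47 = score_list.index(score)
--         elif 20 <= score < 30:
--             is_21 = True
--         elif score == 30:
--             is_30 = True
--         elif 30 < score < 33:
--             is_31 = True
--
--     if not is_21 and not is_30 and not is_31 and is_94:  # 땡 이상이 없고 구사가 나오면
--         result = -1
--     elif is_21 and not is_30 and not is_31 and is_super94:  # 장땡 이상이 없고 멍구사가 나오면
--         result = -1
--     elif is_21 and is_37:  # 1~9땡이 나오고 땡잡이가 나오면
--         result = index_37  # 땡잡이의 위치
--     elif is_31 and is_47:  # 광땡이 나오고 암행어사가 나오면
--         result = index_47  # 암행어사의 위치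
--
--     return result
-- ===== SOURCE B (Python) =====
-- def special_score_compare(score_list):
--     is_94 = -1 in score_list
--     is_super94 = -2 in score_list
--     is_37 = -3 in score_list
--     is_47 = -4 in score_list
--     is_21 = any(20 <= s < 30 for s in score_list)
--     is_30 = 30 in score_list
--     is_31 = any(30 < s < 33 for s in score_list)
--     index_37 = score_list.index(-3) if is_37 else 0
--     index_47 = score_list.index(-4) if is_47 else 0
--
--     if not is_21 and not is_30 and not is_31 and is_94:
--         return -1
--     elif is_21 and not is_30 and not is_31 and is_super94:
--         return -1
--     elif is_21 and is_37:
--         return index_37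
--     elif is_31 and is_47:
--         return index_47
--     return 0
-- ===== Notes on version B (the rewrite author's own statement) =====
-- stated objective: simpler
-- what changed: Replaces the single flag-accumulating loop (with repeated list.index calls inside it) by independent membership/any queries per fact plus one first-occurrence index lookup per marker, keeping the final decision ladder.
import Mathlib
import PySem

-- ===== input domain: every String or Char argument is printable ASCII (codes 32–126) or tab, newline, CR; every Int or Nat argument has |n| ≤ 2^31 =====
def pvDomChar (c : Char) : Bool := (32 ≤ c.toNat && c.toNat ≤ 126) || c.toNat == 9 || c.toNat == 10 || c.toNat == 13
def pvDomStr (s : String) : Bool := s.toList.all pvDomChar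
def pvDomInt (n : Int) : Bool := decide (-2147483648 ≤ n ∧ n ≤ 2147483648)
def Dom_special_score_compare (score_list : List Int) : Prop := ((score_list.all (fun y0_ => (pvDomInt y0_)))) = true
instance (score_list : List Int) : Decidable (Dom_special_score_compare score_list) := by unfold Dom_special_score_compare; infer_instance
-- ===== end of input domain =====

-- B replaces A's single accumulating loop by independent per-fact queries; objective: simpler.

-- ===== PORT A =====
-- loop state: (is_94, is_super94, is_37, is_47, is_21, is_30, is_31, index_37, index_47)
def sscState := Bool × Bool × Bool × Bool × Bool × Bool × Bool × Int × Int

def sscStep (full : List Int) (st : sscState) (score : Int) : sscState :=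
  let (is94, sup94, i37, i47, i21, i30, i31, idx37, idx47) := st
  if score = -1 then (true, sup94, i37, i47, i21, i30, i31, idx37, idx47)
  else if score = -2 then (is94, true, i37, i47, i21, i30, i31, idx37, idx47)
  else if score = -3 then
    (is94, sup94, true, i47, i21, i30, i31, (((PySem.List.index? full score).getD 0 : Nat) : Int), idx47)
  else if score = -4 then
    (is94, sup94, i37, true, i21, i30, i31, idx37, (((PySem.List.index? full score).getD 0 : Nat) : Int))
  else if 20 ≤ score ∧ score < 30 then (is94, sup94, i37, i47, true, i30, i31, idx37, idx47)
  else if score = 30 then (is94, sup94, i37, i47, i21, true, i31, idx37, idx47)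
  else if 30 < score ∧ score < 33 then (is94, sup94, i37, i47, i21, i30, true, idx37, idx47)
  else st

def special_score_compare (score_list : List Int) : Int :=
  let st := score_list.foldl (sscStep score_list) (false, false, false, false, false, false, false, 0, 0)
  let (is94, sup94, i37, i47, i21, i30, i31, idx37, idx47) := st
  if ¬i21 ∧ ¬i30 ∧ ¬i31 ∧ is94 then -1
  else if i21 ∧ ¬i30 ∧ ¬i31 ∧ sup94 then -1
  else if i21 ∧ i37 then idx37
  else if i31 ∧ i47 then idx47
  else 0

-- ===== PORT B =====
def special_score_compare_alt (score_list : List Int) : Int :=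
  let is94 := score_list.contains (-1)
  let sup94 := score_list.contains (-2)
  let i37 := score_list.contains (-3)
  let i47 := score_list.contains (-4)
  let i21 := score_list.any (fun s => decide (20 ≤ s ∧ s < 30))
  let i30 := score_list.contains (30)
  let i31 := score_list.any (fun s => decide (30 < s ∧ s < 33))
  let idx37 : Int := if i37 then (((PySem.List.index? score_list (-3)).getD 0 : Nat) : Int) else 0
  let idx47 : Int := if i47 then (((PySem.List.index? score_list (-4)).getD 0 : Nat) : Int) else 0
  if ¬i21 ∧ ¬i30 ∧ ¬i31 ∧ is94 then -1
  else if i21 ∧ ¬i30 ∧ ¬i31 ∧ sup94 then -1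
  else if i21 ∧ i37 then idx37
  else if i31 ∧ i47 then idx47
  else 0

-- ===== PRECONDITION & SPEC =====
def Spec_special_score_compare (score_list : List Int) (out : Int) : Prop := out = special_score_compare_alt score_list
instance (score_list : List Int) (out : Int) : Decidable (Spec_special_score_compare score_list out) := by unfold Spec_special_score_compare; infer_instance

-- ===== CLAIM (what is proved, stated in full; the proofs are below) =====
def Claim_equal_special_score_compare : Prop := ∀ (score_list : List Int), Dom_special_score_compare score_list → Spec_special_score_compare score_list (special_score_compare score_list)

-- ===== LEMMAS AND PROOFS =====

theorem sscStep_foldl_char (full l : List Int) (is94 sup94 i37 i47 i21 i30 i31 : Bool) (idx37 idx47 : Int) :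
    l.foldl (sscStep full) (is94, sup94, i37, i47, i21, i30, i31, idx37, idx47) =
      (is94 || l.contains (-1), sup94 || l.contains (-2), i37 || l.contains (-3), i47 || l.contains (-4),
       i21 || l.any (fun s => decide (20 ≤ s ∧ s < 30)), i30 || l.contains (30),
       i31 || l.any (fun s => decide (30 < s ∧ s < 33)),
       if l.contains (-3) then (((PySem.List.index? full (-3)).getD 0 : Nat) : Int) else idx37,
       if l.contains (-4) then (((PySem.List.index? full (-4)).getD 0 : Nat) : Int) else idx47) := by
  induction l generalizing is94 sup94 i37 i47 i21 i30 i31 idx37 idx47 with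
  | nil => simp
  | cons x xs ih =>
    simp only [List.foldl_cons, sscStep]
    by_cases h1 : x = -1
    · subst h1; simp [ih]
    · by_cases h2 : x = -2
      · subst h2; simp [ih]
      · by_cases h3 : x = -3
        · subst h3; simp [ih]
        · by_cases h4 : x = -4
          · subst h4; simp [ih]
          · by_cases h5 : 20 ≤ x ∧ x < 30
            · simp only [if_neg h1, if_neg h2, if_neg h3, if_neg h4, if_pos h5, ih]
              have e1 : (-1 : Int) ≠ x := by omega
              have e2 : (-2 : Int) ≠ x := by omega
              have e3 : (-3 : Int) ≠ x := by omega
              have e4 : (-4 : Int) ≠ x := by omega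
              have e6 : (30 : Int) ≠ x := by omega
              have b7 : (decide ((30:Int) < x) && decide (x < 33)) = false := by simp; omega
              have b5 : (decide ((20:Int) ≤ x) && decide (x < 30)) = true := by simp [h5.1, h5.2]
              simp [e1, e2, e3, e4, e6, b7, b5]
            · by_cases h6 : x = 30
              · subst h6; simp [ih]
              · by_cases h7 : 30 < x ∧ x < 33
                · simp only [if_neg h1, if_neg h2, if_neg h3, if_neg h4, if_neg h5, if_neg h6, if_pos h7, ih]
                  have e1 : (-1 : Int) ≠ x := by omega
                  have e2 : (-2 : Int) ≠ x := by omega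
                  have e3 : (-3 : Int) ≠ x := by omega
                  have e4 : (-4 : Int) ≠ x := by omega
                  have e6 : (30 : Int) ≠ x := by omega
                  have b5 : (decide ((20:Int) ≤ x) && decide (x < 30)) = false := by simp; omega
                  have b7 : (decide ((30:Int) < x) && decide (x < 33)) = true := by simp [h7.1, h7.2]
                  simp [e1, e2, e3, e4, e6, b5, b7]
                · simp only [if_neg h1, if_neg h2, if_neg h3, if_neg h4, if_neg h5, if_neg h6, if_neg h7, ih]
                  have e1 : (-1 : Int) ≠ x := by omega
                  have e2 : (-2 : Int) ≠ x := by omega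
                  have e3 : (-3 : Int) ≠ x := by omega
                  have e4 : (-4 : Int) ≠ x := by omega
                  have e6 : (30 : Int) ≠ x := by omega
                  have b5 : (decide ((20:Int) ≤ x) && decide (x < 30)) = false := by simp; omega
                  have b7 : (decide ((30:Int) < x) && decide (x < 33)) = false := by simp; omega
                  simp [e1, e2, e3, e4, e6, b5, b7]

-- ===== VERDICT (by name: the statement is the Claim_ definition above) =====
theorem special_score_compare_spec : Claim_equal_special_score_compare := by
  intro l _
  unfold Spec_special_score_compare special_score_compare special_score_compare_alt
  rw [sscStep_foldl_char]
  simp
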